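-- pv_equiv track=rewrite | github.com/sonald/aish | src/aish/wizard/helpers.py | _normalize_filter_tokens
-- ===== SOURCE A (Python) =====
-- def _normalize_filter_tokens(query: str) -> list[str]:
--     normalized = []
--     for chunk in query.lower().split():
--         token = "".join(
--             char for char in chunk if char.isalnum() or char in {"/", "_", "-", "."}
--         )
--         if token:
--             normalized.append(token)
--     return normalized
-- ===== SOURCE B (Python) =====
-- def _normalize_filter_tokens(query: str) -> list[str]:
--     # single character-level scan (state machine): no split(), no per-chunk pass
--     tokens: list[str] = []
--     current: list[str] = []
--     for ch in query.lower():
--         if ch.isspace():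
--             if current:
--                 tokens.append("".join(current))
--                 current = []
--         elif ch.isalnum() or ch in "/_-.":
--             current.append(ch)
--     if current:
--         tokens.append("".join(current))
--     return tokens
-- ===== Notes on version B (the rewrite author's own statement) =====
-- stated objective: alternative
-- what changed: A splits the lowered string into chunks and then filters each chunk in a second pass with an emptiness test; B is a single character-level state machine over the lowered string that accumulates the current token and emits it at whitespace, never calling split or filtering chunks.
import Mathlib
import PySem

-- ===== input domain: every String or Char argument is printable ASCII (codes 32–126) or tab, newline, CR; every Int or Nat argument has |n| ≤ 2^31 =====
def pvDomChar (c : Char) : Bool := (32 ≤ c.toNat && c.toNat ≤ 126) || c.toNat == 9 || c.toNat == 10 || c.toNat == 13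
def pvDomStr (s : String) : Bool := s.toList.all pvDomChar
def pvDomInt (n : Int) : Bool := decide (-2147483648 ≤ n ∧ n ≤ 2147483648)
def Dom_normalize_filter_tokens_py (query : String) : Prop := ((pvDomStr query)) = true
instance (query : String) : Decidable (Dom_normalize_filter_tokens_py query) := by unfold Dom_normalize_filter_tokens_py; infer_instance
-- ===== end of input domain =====

-- ===== PORT A =====
-- B replaces A's split-then-filter-each-chunk loop by a single character-level
-- state machine over the lowered string (objective: alternative decomposition).

-- char condition of A's generator: char.isalnum() or char in {"/", "_", "-", "."}
def pvKeep (c : Char) : Bool :=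
  PySem.Chars.isalnum c || c == '/' || c == '_' || c == '-' || c == '.'

def normalize_filter_tokens_py (query : String) : List String :=
  (PySem.Str.split₀ (PySem.Str.lower query)).foldl
    (fun normalized chunk =>
      let token := String.ofList (chunk.toList.filter pvKeep)  -- "".join(char for char in chunk if …)
      if token ≠ "" then normalized ++ [token] else normalized)
    []

-- ===== PORT B =====
-- the for-loop of Source B: state = (current, tokens); emit current at whitespace,
-- extend it on a kept character; flush the last token after the loop
def pvScanGo : List Char → List Char → List String → List String
  | [], current, tokens =>
      if current = [] then tokens else tokens ++ [String.ofList current]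
  | c :: rest, current, tokens =>
      if PySem.Chars.isspace c then
        if current = [] then pvScanGo rest current tokens
        else pvScanGo rest [] (tokens ++ [String.ofList current])
      else if pvKeep c then pvScanGo rest (current ++ [c]) tokens
      else pvScanGo rest current tokens

def normalize_filter_tokens_py_alt (query : String) : List String :=
  pvScanGo (PySem.Str.lower query).toList [] []

-- ===== PRECONDITION & SPEC =====
def Spec_normalize_filter_tokens_py (query : String) (out : List String) : Prop := out = normalize_filter_tokens_py_alt query
instance (query : String) (out : List String) : Decidable (Spec_normalize_filter_tokens_py query out) := by unfold Spec_normalize_filter_tokens_py; infer_instance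

-- ===== CLAIM (what is proved, stated in full; the proofs are below) =====
def Claim_equal_normalize_filter_tokens_py : Prop := ∀ (query : String), Dom_normalize_filter_tokens_py query → Spec_normalize_filter_tokens_py query (normalize_filter_tokens_py query)

-- ===== LEMMAS AND PROOFS =====

-- tokens already emitted only get appended to
lemma pvScanGo_tokens (s : List Char) : ∀ (cur : List Char) (toks : List String),
    pvScanGo s cur toks = toks ++ pvScanGo s cur [] := by
  induction s with
  | nil =>
    intro cur toks
    by_cases h : cur = [] <;> simp [pvScanGo, h]
  | cons c rest ih =>
    intro cur toks
    by_cases hsp : PySem.Chars.isspace c = true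
    · by_cases h : cur = []
      · have e : ∀ t, pvScanGo (c :: rest) cur t = pvScanGo rest cur t := by
          intro t; simp [pvScanGo, hsp, h]
        rw [e, e, ih]
      · have e : ∀ t, pvScanGo (c :: rest) cur t = pvScanGo rest [] (t ++ [String.ofList cur]) := by
          intro t; simp [pvScanGo, hsp, h]
        rw [e, e, ih [] (toks ++ [String.ofList cur]), ih [] ([] ++ [String.ofList cur])]
        simp
    · have hsp' : PySem.Chars.isspace c = false := by simpa using hsp
      by_cases hk : pvKeep c = true
      · have e : ∀ t, pvScanGo (c :: rest) cur t = pvScanGo rest (cur ++ [c]) t := by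
          intro t; simp [pvScanGo, hsp', hk]
        rw [e, e, ih]
      · have hk' : pvKeep c = false := by simpa using hk
        have e : ∀ t, pvScanGo (c :: rest) cur t = pvScanGo rest cur t := by
          intro t; simp [pvScanGo, hsp', hk']
        rw [e, e, ih]

-- split₀.go's accumulator only gets appended to (reversed) in front
lemma pv_go_acc (s : List Char) : ∀ (cur : List Char) (acc : List (List Char)),
    PySem.Chars.split₀.go s cur acc = acc.reverse ++ PySem.Chars.split₀.go s cur [] := by
  induction s with
  | nil =>
    intro cur acc
    by_cases h : cur.isEmpty = true <;> simp [PySem.Chars.split₀.go, h]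
  | cons c rest ih =>
    intro cur acc
    by_cases hsp : PySem.Chars.isspace c = true
    · by_cases h : cur.isEmpty = true
      · have e : ∀ a, PySem.Chars.split₀.go (c :: rest) cur a = PySem.Chars.split₀.go rest [] a := by
          intro a; simp [PySem.Chars.split₀.go, hsp, h]
        rw [e, e, ih]
      · have e : ∀ a, PySem.Chars.split₀.go (c :: rest) cur a
            = PySem.Chars.split₀.go rest [] (cur.reverse :: a) := by
          intro a; simp [PySem.Chars.split₀.go, hsp, h]
        rw [e, e, ih [] (cur.reverse :: acc), ih [] [cur.reverse]]
        simp
    · have hsp' : PySem.Chars.isspace c = false := by simpa using hsp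
      have e : ∀ a, PySem.Chars.split₀.go (c :: rest) cur a
          = PySem.Chars.split₀.go rest (c :: cur) a := by
        intro a; simp [PySem.Chars.split₀.go, hsp']
      rw [e, e, ih]

-- what A does to one raw chunk
def pvPost (l : List (List Char)) : List String :=
  ((l.map (fun u => u.filter pvKeep)).filter (fun t => !t.isEmpty)).map String.ofList

lemma pvPost_append (l₁ l₂ : List (List Char)) :
    pvPost (l₁ ++ l₂) = pvPost l₁ ++ pvPost l₂ := by
  simp [pvPost]

-- the scan simulates split₀.go followed by A's per-chunk filtering
lemma pv_scan_sim (s : List Char) : ∀ (cur : List Char),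
    pvScanGo s ((cur.filter pvKeep).reverse) [] = pvPost (PySem.Chars.split₀.go s cur []) := by
  induction s with
  | nil =>
    intro cur
    by_cases h : cur.isEmpty = true
    · have : cur = [] := List.isEmpty_iff.mp h
      subst this
      simp [pvScanGo, PySem.Chars.split₀.go, pvPost]
    · rw [show PySem.Chars.split₀.go [] cur [] = [cur.reverse] from by
        simp [PySem.Chars.split₀.go, h]]
      by_cases hf : cur.filter pvKeep = []
      · simp [pvScanGo, hf, pvPost, List.filter_reverse]
      · have h1 : (cur.filter pvKeep).reverse ≠ [] := by simpa using hf
        simp [pvScanGo, h1, pvPost, List.filter_reverse, hf]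
  | cons c rest ih =>
    intro cur
    by_cases hsp : PySem.Chars.isspace c = true
    · by_cases h : cur.isEmpty = true
      · have : cur = [] := List.isEmpty_iff.mp h
        subst this
        rw [show PySem.Chars.split₀.go (c :: rest) [] [] = PySem.Chars.split₀.go rest [] [] from by
          simp [PySem.Chars.split₀.go, hsp]]
        rw [show pvScanGo (c :: rest) ((List.filter pvKeep []).reverse) []
              = pvScanGo rest ((List.filter pvKeep []).reverse) [] from by
          simp [pvScanGo, hsp]]
        exact ih []
      · rw [show PySem.Chars.split₀.go (c :: rest) cur []
              = PySem.Chars.split₀.go rest [] [cur.reverse] from by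
          simp [PySem.Chars.split₀.go, hsp, h]]
        rw [pv_go_acc rest [] [cur.reverse]]
        rw [show ([cur.reverse] : List (List Char)).reverse = [cur.reverse] from rfl]
        rw [pvPost_append]
        by_cases hf : cur.filter pvKeep = []
        · have h1 : (cur.filter pvKeep).reverse = [] := by simpa using hf
          have h2 : pvPost [cur.reverse] = [] := by
            simp [pvPost, List.filter_reverse, hf]
          rw [h2, List.nil_append, h1]
          rw [show pvScanGo (c :: rest) [] [] = pvScanGo rest [] [] from by
            simp [pvScanGo, hsp]]
          simpa using ih []
        · have h1 : (cur.filter pvKeep).reverse ≠ [] := by simpa using hf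
          have h2 : pvPost [cur.reverse] = [String.ofList ((cur.filter pvKeep).reverse)] := by
            simp [pvPost, List.filter_reverse, hf]
          rw [h2]
          rw [show pvScanGo (c :: rest) ((cur.filter pvKeep).reverse) []
                = pvScanGo rest [] ([] ++ [String.ofList ((cur.filter pvKeep).reverse)]) from by
            simp [pvScanGo, hsp, h1]]
          rw [pvScanGo_tokens rest [] ([] ++ [String.ofList ((cur.filter pvKeep).reverse)])]
          have := ih []
          simp only [List.filter_nil, List.reverse_nil] at this
          rw [this]
          simp
    · have hsp' : PySem.Chars.isspace c = false := by simpa using hsp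
      rw [show PySem.Chars.split₀.go (c :: rest) cur []
            = PySem.Chars.split₀.go rest (c :: cur) [] from by
        simp [PySem.Chars.split₀.go, hsp']]
      by_cases hk : pvKeep c = true
      · have hrev : ((c :: cur).filter pvKeep).reverse = (cur.filter pvKeep).reverse ++ [c] := by
          simp [List.filter_cons_of_pos hk]
        rw [show pvScanGo (c :: rest) ((cur.filter pvKeep).reverse) []
              = pvScanGo rest ((cur.filter pvKeep).reverse ++ [c]) [] from by
          simp [pvScanGo, hsp', hk]]
        rw [← hrev]
        exact ih (c :: cur)
      · have hk' : pvKeep c = false := by simpa using hk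
        have hfe : (c :: cur).filter pvKeep = cur.filter pvKeep := by
          simp [List.filter_cons, hk']
        rw [show pvScanGo (c :: rest) ((cur.filter pvKeep).reverse) []
              = pvScanGo rest ((cur.filter pvKeep).reverse) [] from by
          simp [pvScanGo, hsp', hk']]
        rw [show (cur.filter pvKeep) = ((c :: cur).filter pvKeep) from hfe.symm]
        exact ih (c :: cur)

-- A's accumulating loop in map/filter form
lemma pv_foldl_form (chunks : List String) (acc : List String) :
    chunks.foldl
      (fun normalized chunk =>
        let token := String.ofList (chunk.toList.filter pvKeep)
        if token ≠ "" then normalized ++ [token] else normalized) acc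
    = acc ++ ((chunks.map (fun chunk => String.ofList (chunk.toList.filter pvKeep))).filter
        (fun t => decide (t ≠ ""))) := by
  induction chunks generalizing acc with
  | nil => simp
  | cons chunk rest ih =>
    simp only [List.foldl_cons, List.map_cons, List.filter_cons]
    by_cases h : String.ofList (chunk.toList.filter pvKeep) ≠ ""
    · rw [if_pos h, ih]
      simp [h]
    · rw [if_neg h, ih]
      simp [h]

lemma pv_ofList_ne_empty (l : List Char) : (String.ofList l ≠ "") ↔ l ≠ [] := by
  constructor
  · intro h hl; exact h (by simp [hl])
  · intro h he
    apply h
    have := congrArg String.toList he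
    simpa using this

-- A's map-filter over string chunks equals pvPost over raw chunks
lemma pv_post_eq (l : List (List Char)) :
    (((l.map String.ofList).map (fun chunk => String.ofList (chunk.toList.filter pvKeep))).filter
        (fun t => decide (t ≠ ""))) = pvPost l := by
  induction l with
  | nil => simp [pvPost]
  | cons u rest ih =>
    simp only [List.map_cons, List.filter_cons, String.toList_ofList, pvPost,
      List.map_map] at ih ⊢
    by_cases h : u.filter pvKeep = []
    · have h1 : String.ofList (u.filter pvKeep) = "" := by rw [h]
      rw [ih]
      simp [h1, h]
    · have h1 : String.ofList (u.filter pvKeep) ≠ "" := (pv_ofList_ne_empty _).mpr h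
      rw [ih]
      simp [h1, h]

-- ===== VERDICT (by name: the statement is the Claim_ definition above) =====
theorem normalize_filter_tokens_py_spec : Claim_equal_normalize_filter_tokens_py := by
  intro query _
  unfold Spec_normalize_filter_tokens_py normalize_filter_tokens_py normalize_filter_tokens_py_alt
  rw [pv_foldl_form, List.nil_append]
  simp only [PySem.Str.split₀]
  rw [pv_post_eq]
  have := pv_scan_sim (PySem.Str.lower query).toList []
  simpa [PySem.Chars.split₀] using this.symm
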